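-- pv_equiv track=rewrite | github.com/ryota37/KyoProClub | 2024-04-24/C_Tetrahedral_Number.py | sum_combinations
-- ===== SOURCE A (Python) =====
-- def sum_combinations(number):
--     combinations = []
--     for i in range(number+1):
--         for j in range(number+1):
--             for k in range(number+1):
--                 if i + j + k == number:
--                     combinations.append((i, j, k))
--     return combinations
-- ===== SOURCE B (Python) =====
-- def sum_combinations(number):
--     # Two loops; the third coordinate is determined: k = number - i - j.
--     return [(i, j, number - i - j)
--             for i in range(number + 1)
--             for j in range(number + 1 - i)]
-- ===== Notes on version B (the rewrite author's own statement) =====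
-- stated objective: faster
-- what changed: Replaces the triple nested scan (testing i+j+k==number for every k) by a double comprehension that computes the third coordinate directly as k=number-i-j with the j-range capped at number-i.
import Mathlib
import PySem

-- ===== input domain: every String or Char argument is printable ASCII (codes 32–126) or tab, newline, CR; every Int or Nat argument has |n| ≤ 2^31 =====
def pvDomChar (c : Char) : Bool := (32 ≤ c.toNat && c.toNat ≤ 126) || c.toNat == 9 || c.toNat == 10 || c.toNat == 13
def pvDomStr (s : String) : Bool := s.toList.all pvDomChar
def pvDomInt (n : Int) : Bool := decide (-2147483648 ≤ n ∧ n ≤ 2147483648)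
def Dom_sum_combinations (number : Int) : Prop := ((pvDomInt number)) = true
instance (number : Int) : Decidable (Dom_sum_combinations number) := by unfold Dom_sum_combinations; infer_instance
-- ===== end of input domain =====

-- B replaces A's triple nested scan by two loops with k computed directly (asymptotically faster).

-- ===== PORT A =====
-- literal transliteration of A: three nested for-loops over range(number+1), appending on i+j+k == number
def sum_combinations (number : Int) : List (Int × Int × Int) :=
  (PySem.List.pyRange 0 (number + 1) 1).foldl (fun acc i =>
    (PySem.List.pyRange 0 (number + 1) 1).foldl (fun acc j =>
      (PySem.List.pyRange 0 (number + 1) 1).foldl (fun acc k =>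
        if i + j + k = number then acc ++ [(i, j, k)] else acc) acc) acc) []

-- ===== PORT B =====
-- literal transliteration of B: the double comprehension, j capped at number-i, k computed
def sum_combinations_alt (number : Int) : List (Int × Int × Int) :=
  (PySem.List.pyRange 0 (number + 1) 1).flatMap (fun i =>
    (PySem.List.pyRange 0 (number + 1 - i) 1).map (fun j => (i, j, number - i - j)))

-- ===== PRECONDITION & SPEC =====
def Spec_sum_combinations (number : Int) (out : List (Int × Int × Int)) : Prop := out = sum_combinations_alt number
instance (number : Int) (out : List (Int × Int × Int)) : Decidable (Spec_sum_combinations number out) := by unfold Spec_sum_combinations; infer_instance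

-- ===== CLAIM (what is proved, stated in full; the proofs are below) =====
def Claim_equal_sum_combinations : Prop := ∀ (number : Int), Dom_sum_combinations number → Spec_sum_combinations number (sum_combinations number)

-- ===== LEMMAS AND PROOFS =====

-- filtering an arithmetic range for one fixed value keeps exactly that value when in range
lemma filter_pyRange_eq_single (a b c : Int) :
    (PySem.List.pyRange a b 1).filter (fun k => decide (k = c)) =
      if a ≤ c ∧ c < b then [c] else [] := by
  by_cases hab : b ≤ a
  · rw [PySem.List.pyRange_one_eq_nil hab]
    simp only [List.filter_nil]
    rw [if_neg]; omega
  · have hab2 : a < b := by omega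
    have hrec : (b - (a + 1)).toNat < (b - a).toNat := by omega
    rw [PySem.List.pyRange_one_cons hab2]
    rw [List.filter_cons]
    rw [filter_pyRange_eq_single (a + 1) b c]
    by_cases hc : a = c
    · subst hc
      simp only [decide_true, if_true]
      rw [if_neg (show ¬(a + 1 ≤ a ∧ a < b) by omega), if_pos ⟨le_rfl, hab2⟩]
    · have hd : decide (a = c) = false := by simp [hc]
      rw [hd]
      simp only [Bool.false_eq_true, if_false]
      by_cases h2 : a + 1 ≤ c ∧ c < b
      · rw [if_pos h2, if_pos (by omega)]
      · rw [if_neg h2, if_neg (by omega)]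
termination_by (b - a).toNat

-- the inner two loops of A (for fixed i with 0 ≤ i ≤ number) collapse to B's inner comprehension
lemma inner_loops_eq (n i : Int) (hi0 : 0 ≤ i) (hin : i < n + 1) :
    (PySem.List.pyRange 0 (n + 1) 1).flatMap (fun j =>
      ((PySem.List.pyRange 0 (n + 1) 1).filter (fun k => decide (i + j + k = n))).map
        (fun k => (i, j, k))) =
    (PySem.List.pyRange 0 (n + 1 - i) 1).map (fun j => (i, j, n - i - j)) := by
  have hstep1 : (PySem.List.pyRange 0 (n + 1) 1).flatMap (fun j =>
      ((PySem.List.pyRange 0 (n + 1) 1).filter (fun k => decide (i + j + k = n))).map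
        (fun k => (i, j, k))) =
      (PySem.List.pyRange 0 (n + 1) 1).flatMap (fun j =>
        if j < n + 1 - i then [(i, j, n - i - j)] else []) := by
    apply List.flatMap_congr
    intro j hj
    rw [PySem.List.mem_pyRange_one] at hj
    have hfe : (PySem.List.pyRange 0 (n + 1) 1).filter (fun k => decide (i + j + k = n)) =
        (PySem.List.pyRange 0 (n + 1) 1).filter (fun k => decide (k = n - i - j)) := by
      apply List.filter_congr
      intro k _
      simp only [decide_eq_decide]
      omega
    rw [hfe, filter_pyRange_eq_single]
    by_cases hlt : j < n + 1 - i
    · rw [if_pos (by omega), if_pos hlt]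
      simp
    · rw [if_neg (by omega), if_neg hlt]
      simp
  rw [hstep1]
  have hsplit : PySem.List.pyRange 0 (n + 1) 1 =
      PySem.List.pyRange 0 (n + 1 - i) 1 ++ PySem.List.pyRange (n + 1 - i) (n + 1) 1 :=
    PySem.List.pyRange_one_append 0 (n + 1 - i) (n + 1) (by omega) (by omega)
  rw [hsplit, List.flatMap_append]
  have h2 : (PySem.List.pyRange (n + 1 - i) (n + 1) 1).flatMap (fun j =>
      if j < n + 1 - i then [(i, j, n - i - j)] else []) = [] := by
    apply List.flatMap_eq_nil_iff.mpr
    intro j hj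
    rw [PySem.List.mem_pyRange_one] at hj
    rw [if_neg (by omega)]
  rw [h2, List.append_nil]
  have h1 : (PySem.List.pyRange 0 (n + 1 - i) 1).flatMap (fun j =>
      if j < n + 1 - i then [(i, j, n - i - j)] else []) =
      (PySem.List.pyRange 0 (n + 1 - i) 1).flatMap (fun j => [(i, j, n - i - j)]) := by
    apply List.flatMap_congr
    intro j hj
    rw [PySem.List.mem_pyRange_one] at hj
    rw [if_pos hj.2]
  rw [h1]
  exact List.flatMap_pure_eq_map (fun j => (i, j, n - i - j)) _

-- ===== VERDICT (by name: the statement is the Claim_ definition above) =====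
theorem sum_combinations_spec : Claim_equal_sum_combinations := by
  intro n _
  show sum_combinations n = sum_combinations_alt n
  unfold sum_combinations sum_combinations_alt
  -- collapse A's append-loops to filter/flatMap shape
  have step : ∀ (acc : List (Int × Int × Int)),
      (PySem.List.pyRange 0 (n + 1) 1).foldl (fun acc i =>
        (PySem.List.pyRange 0 (n + 1) 1).foldl (fun acc j =>
          (PySem.List.pyRange 0 (n + 1) 1).foldl (fun acc k =>
            if i + j + k = n then acc ++ [(i, j, k)] else acc) acc) acc) acc =
      acc ++ (PySem.List.pyRange 0 (n + 1) 1).flatMap (fun i =>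
        (PySem.List.pyRange 0 (n + 1) 1).flatMap (fun j =>
          ((PySem.List.pyRange 0 (n + 1) 1).filter (fun k => decide (i + j + k = n))).map
            (fun k => (i, j, k)))) := by
    intro acc
    have e1 : ∀ (i j : Int) (acc : List (Int × Int × Int)),
        (PySem.List.pyRange 0 (n + 1) 1).foldl (fun acc k =>
          if i + j + k = n then acc ++ [(i, j, k)] else acc) acc =
        acc ++ ((PySem.List.pyRange 0 (n + 1) 1).filter (fun k => decide (i + j + k = n))).map
          (fun k => (i, j, k)) := fun i j acc =>
      PySem.List.foldl_append_ite _ _ _ _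
    have e2 : ∀ (i : Int) (acc : List (Int × Int × Int)),
        (PySem.List.pyRange 0 (n + 1) 1).foldl (fun acc j =>
          (PySem.List.pyRange 0 (n + 1) 1).foldl (fun acc k =>
            if i + j + k = n then acc ++ [(i, j, k)] else acc) acc) acc =
        acc ++ (PySem.List.pyRange 0 (n + 1) 1).flatMap (fun j =>
          ((PySem.List.pyRange 0 (n + 1) 1).filter (fun k => decide (i + j + k = n))).map
            (fun k => (i, j, k))) := by
      intro i acc
      calc (PySem.List.pyRange 0 (n + 1) 1).foldl (fun acc j =>
            (PySem.List.pyRange 0 (n + 1) 1).foldl (fun acc k =>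
              if i + j + k = n then acc ++ [(i, j, k)] else acc) acc) acc
          = (PySem.List.pyRange 0 (n + 1) 1).foldl (fun acc j =>
              acc ++ ((PySem.List.pyRange 0 (n + 1) 1).filter
                (fun k => decide (i + j + k = n))).map (fun k => (i, j, k))) acc := by
            apply PySem.List.foldl_congr_mem
            intro acc j _
            exact e1 i j acc
        _ = _ := PySem.List.foldl_append_eq_flatMap _ _ _
    calc (PySem.List.pyRange 0 (n + 1) 1).foldl (fun acc i =>
          (PySem.List.pyRange 0 (n + 1) 1).foldl (fun acc j =>
            (PySem.List.pyRange 0 (n + 1) 1).foldl (fun acc k =>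
              if i + j + k = n then acc ++ [(i, j, k)] else acc) acc) acc) acc
        = (PySem.List.pyRange 0 (n + 1) 1).foldl (fun acc i =>
            acc ++ (PySem.List.pyRange 0 (n + 1) 1).flatMap (fun j =>
              ((PySem.List.pyRange 0 (n + 1) 1).filter
                (fun k => decide (i + j + k = n))).map (fun k => (i, j, k)))) acc := by
          apply PySem.List.foldl_congr_mem
          intro acc i _
          exact e2 i acc
      _ = _ := PySem.List.foldl_append_eq_flatMap _ _ _
  rw [step, List.nil_append]
  apply List.flatMap_congr
  intro i hi
  rw [PySem.List.mem_pyRange_one] at hi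
  exact inner_loops_eq n i hi.1 hi.2
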